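-- pv_equiv track=rewrite | github.com/kirill-kondrashov/lean-misc | tools/problem1_odd_profile_search.py | enumerate_shifted_uniform_families
-- ===== SOURCE A (Python) =====
-- from typing import Dict, Iterable, List, Sequence, Set, Tuple
--
-- Family = Tuple[int, ...]
--
-- def subset_cardinality(mask: int) -> int:
--     return mask.bit_count()
--
-- def rank_subsets(n: int, rank: int, subsets: Sequence[int]) -> Tuple[int, ...]:
--     del n
--     return tuple(sorted(subset for subset in subsets if subset_cardinality(subset) == rank))
--
-- def subset_tuple(mask: int) -> Tuple[int, ...]:
--     return tuple(index for index in range(mask.bit_length()) if mask & (1 << index))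
--
-- def shifted_leq(left: int, right: int) -> bool:
--     left_tuple = subset_tuple(left)
--     right_tuple = subset_tuple(right)
--     if len(left_tuple) != len(right_tuple):
--         return False
--     return all(left_item <= right_item for left_item, right_item in zip(left_tuple, right_tuple))
--
-- def enumerate_shifted_uniform_families(n: int, rank: int, subsets: Sequence[int]) -> List[Family]:
--     rank_family = rank_subsets(n, rank, subsets)
--     order = sorted(rank_family, key=subset_tuple, reverse=True)
--     comparable: Dict[int, Set[int]] = {mask: set() for mask in rank_family}
--     for left in rank_family:
--         for right in rank_family:
--             if shifted_leq(left, right) or shifted_leq(right, left):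
--                 comparable[left].add(right)
--
--     antichains: List[Tuple[int, ...]] = []
--     chosen: List[int] = []
--
--     def go(index: int, forbidden: Set[int]) -> None:
--         if index == len(order):
--             antichains.append(tuple(chosen))
--             return
--         current = order[index]
--         go(index + 1, forbidden)
--         if current not in forbidden:
--             chosen.append(current)
--             go(index + 1, forbidden | comparable[current])
--             chosen.pop()
--
--     go(0, set())
--     families: List[Family] = []
--     for antichain in antichains:
--         family = tuple(
--             sorted(
--                 subset
--                 for subset in rank_family
--                 if any(shifted_leq(subset, maximal) for maximal in antichain)
--             )
--         )
--         families.append(family)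
--     return families
-- ===== SOURCE B (Python) =====
-- from typing import Dict, List, Sequence, Set, Tuple
--
-- Family = Tuple[int, ...]
--
-- def subset_cardinality(mask: int) -> int:
--     return mask.bit_count()
--
-- def rank_subsets(n: int, rank: int, subsets: Sequence[int]) -> Tuple[int, ...]:
--     del n
--     return tuple(sorted(subset for subset in subsets if subset_cardinality(subset) == rank))
--
-- def subset_tuple(mask: int) -> Tuple[int, ...]:
--     return tuple(index for index in range(mask.bit_length()) if mask & (1 << index))
--
-- def shifted_leq(left: int, right: int) -> bool:
--     left_tuple = subset_tuple(left)
--     right_tuple = subset_tuple(right)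
--     if len(left_tuple) != len(right_tuple):
--         return False
--     return all(l <= r for l, r in zip(left_tuple, right_tuple))
--
-- def enumerate_shifted_uniform_families(n: int, rank: int, subsets: Sequence[int]) -> List[Family]:
--     rank_family = rank_subsets(n, rank, subsets)
--     order = sorted(rank_family, key=subset_tuple, reverse=True)
--     comparable: Dict[int, Set[int]] = {mask: set() for mask in rank_family}
--     for left in rank_family:
--         for right in rank_family:
--             if shifted_leq(left, right) or shifted_leq(right, left):
--                 comparable[left].add(right)
--
--     # Iterative DFS over an explicit worklist of frames (index, forbidden, chosen);
--     # the exclude-current frame is pushed last so it is popped (and finished) first,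
--     # and each leaf immediately emits its family - no intermediate antichain list.
--     families: List[Family] = []
--     stack: List[Tuple[int, Set[int], Tuple[int, ...]]] = [(0, set(), ())]
--     while stack:
--         index, forbidden, chosen = stack.pop()
--         if index == len(order):
--             families.append(tuple(sorted(
--                 subset for subset in rank_family
--                 if any(shifted_leq(subset, maximal) for maximal in chosen)
--             )))
--             continue
--         current = order[index]
--         if current not in forbidden:
--             stack.append((index + 1, forbidden | comparable[current], chosen + (current,)))
--         stack.append((index + 1, forbidden, chosen))
--     return families
-- ===== Notes on version B (the rewrite author's own statement) =====
-- stated objective: alternative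
-- what changed: The recursive backtracking generator (mutable chosen list, global antichain accumulator, separate second pass turning antichains into families) is replaced by an iterative explicit worklist of (index, forbidden, chosen) frames, popped exclude-branch-first to reproduce the DFS order, with each leaf emitting its family directly so the antichain list and the second pass disappear.
import Mathlib
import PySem

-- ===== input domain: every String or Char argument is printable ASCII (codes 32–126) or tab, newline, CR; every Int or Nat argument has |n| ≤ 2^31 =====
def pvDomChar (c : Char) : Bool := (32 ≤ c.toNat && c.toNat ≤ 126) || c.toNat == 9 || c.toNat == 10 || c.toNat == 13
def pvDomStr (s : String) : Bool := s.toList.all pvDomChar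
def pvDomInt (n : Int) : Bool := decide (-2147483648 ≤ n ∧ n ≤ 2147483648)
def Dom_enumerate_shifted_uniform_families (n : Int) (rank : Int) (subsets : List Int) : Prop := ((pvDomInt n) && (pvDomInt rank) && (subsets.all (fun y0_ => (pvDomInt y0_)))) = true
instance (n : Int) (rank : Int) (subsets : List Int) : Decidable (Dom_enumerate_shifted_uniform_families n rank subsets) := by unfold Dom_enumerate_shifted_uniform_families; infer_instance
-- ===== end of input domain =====

-- B replaces the recursive DFS + second antichain→family pass by an explicit worklist of
-- frames emitting each family at its leaf (alternative decomposition, same enumeration order).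

-- ===== PORT A =====
-- helpers shared verbatim by A and B (B's Python keeps them identical)

-- mask.bit_count() (Python-exact on negatives via PySem.Int.bitCount)
def subset_cardinality (mask : Int) : Int := (PySem.Int.bitCount mask : Int)

-- sorted(subset for subset in subsets if subset_cardinality(subset) == rank)
def rank_subsets (n : Int) (rank : Int) (subsets : List Int) : List Int :=
  PySem.List.sorted (subsets.filter (fun subset => subset_cardinality subset == rank)) (fun x => x) false

-- tuple(index for index in range(mask.bit_length()) if mask & (1 << index))
def subset_tuple (mask : Int) : List Int :=
  (PySem.List.pyRange 0 (PySem.Int.bitLength mask) 1).filter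
    (fun index => PySem.Int.band mask ((1 : Int) <<< index.toNat) != 0)

def shifted_leq (left : Int) (right : Int) : Bool :=
  let left_tuple := subset_tuple left
  let right_tuple := subset_tuple right
  if left_tuple.length != right_tuple.length then false
  else (left_tuple.zip right_tuple).all (fun p => p.1 ≤ p.2)

-- comparable = {mask: set() for mask in rank_family}; then the nested for-loops adding rights
def comparableOf (rank_family : List Int) : PySem.Dict Int (PySem.Set Int) :=
  let d := rank_family.foldl (fun d mask => d.insert mask PySem.Set.empty) PySem.Dict.empty
  rank_family.foldl (fun d left =>
    rank_family.foldl (fun d right =>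
      if shifted_leq left right || shifted_leq right left then
        -- comparable[left].add(right); 'left' is always a key, so the default is never used
        PySem.Dict.modify d left PySem.Set.empty (fun s => PySem.Set.add s right)
      else d) d) d

-- tuple(sorted(subset for subset in rank_family if any(shifted_leq(subset, maximal) for maximal in antichain)))
def familyOf (rank_family : List Int) (antichain : List Int) : List Int :=
  PySem.List.sorted
    (rank_family.filter (fun subset => antichain.any (fun maximal => shifted_leq subset maximal)))
    (fun x => x) false

-- A's recursive go: exclude-branch first, then (if allowed) include-branch; leaves emit chosen
def esuf_go (cmp : PySem.Dict Int (PySem.Set Int)) :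
    List Int → PySem.Set Int → List Int → List (List Int)
  | [], _forbidden, chosen => [chosen]
  | current :: rest, forbidden, chosen =>
      esuf_go cmp rest forbidden chosen ++
      (if !(PySem.Set.contains forbidden current) then
        -- comparable[current]: 'current' is always a key, so the default is never used
        esuf_go cmp rest (PySem.Set.union forbidden (cmp.getD current PySem.Set.empty))
          (chosen ++ [current])
      else [])

def enumerate_shifted_uniform_families (n : Int) (rank : Int) (subsets : List Int) : List (List Int) :=
  let rank_family := rank_subsets n rank subsets
  let order := PySem.List.sorted rank_family subset_tuple true
  let cmp := comparableOf rank_family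
  let antichains := esuf_go cmp order PySem.Set.empty []
  antichains.foldl (fun families antichain => families ++ [familyOf rank_family antichain]) []

-- ===== PORT B =====
-- termination measure for the worklist: leaves weigh 1, a frame with r items left weighs 2^(r+1)-1
def esuf_frameWeight (fr : List Int × PySem.Set Int × List Int) : Nat := 2 ^ (fr.1.length + 1) - 1

-- B's while-loop: stack top at the list head (Python's stack.pop() pops the last append);
-- the exclude frame is pushed last, hence popped first; leaves emit their family directly.
-- (B's Python frames carry an index into order; the port carries the suffix order[index:].)
def esuf_loop (cmp : PySem.Dict Int (PySem.Set Int)) (rank_family : List Int) :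
    List (List Int × PySem.Set Int × List Int) → List (List Int) → List (List Int)
  | [], families => families
  | ([], _forbidden, chosen) :: st, families =>
      esuf_loop cmp rank_family st (families ++ [familyOf rank_family chosen])
  | (current :: rest, forbidden, chosen) :: st, families =>
      if !(PySem.Set.contains forbidden current) then
        esuf_loop cmp rank_family
          ((rest, forbidden, chosen) ::
            (rest, PySem.Set.union forbidden (cmp.getD current PySem.Set.empty),
              chosen ++ [current]) :: st)
          families
      else
        esuf_loop cmp rank_family ((rest, forbidden, chosen) :: st) families
  termination_by stack _ => (stack.map esuf_frameWeight).sum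
  decreasing_by
  · simp [esuf_frameWeight]
  · simp only [List.map_cons, List.sum_cons, esuf_frameWeight, List.length_cons]
    have h0 : 1 ≤ 2 ^ rest.length := Nat.one_le_two_pow
    omega
  · simp only [List.map_cons, List.sum_cons, esuf_frameWeight, List.length_cons]
    have h0 : 1 ≤ 2 ^ rest.length := Nat.one_le_two_pow
    omega

def enumerate_shifted_uniform_families_alt (n : Int) (rank : Int) (subsets : List Int) : List (List Int) :=
  let rank_family := rank_subsets n rank subsets
  let order := PySem.List.sorted rank_family subset_tuple true
  let cmp := comparableOf rank_family
  esuf_loop cmp rank_family [(order, PySem.Set.empty, [])] []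

-- ===== PRECONDITION & SPEC =====
def Spec_enumerate_shifted_uniform_families (n : Int) (rank : Int) (subsets : List Int) (out : List (List Int)) : Prop := out = enumerate_shifted_uniform_families_alt n rank subsets
instance (n : Int) (rank : Int) (subsets : List Int) (out : List (List Int)) : Decidable (Spec_enumerate_shifted_uniform_families n rank subsets out) := by unfold Spec_enumerate_shifted_uniform_families; infer_instance

-- ===== CLAIM (what is proved, stated in full; the proofs are below) =====
def Claim_equal_enumerate_shifted_uniform_families : Prop := ∀ (n : Int) (rank : Int) (subsets : List Int), Dom_enumerate_shifted_uniform_families n rank subsets → Spec_enumerate_shifted_uniform_families n rank subsets (enumerate_shifted_uniform_families n rank subsets)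

-- ===== LEMMAS AND PROOFS =====

-- popping a frame runs to completion the DFS rooted there, appending exactly the families
-- of the antichains A's go enumerates from that frame, before the rest of the stack is touched
theorem esuf_loop_frame (cmp : PySem.Dict Int (PySem.Set Int)) (rank_family : List Int)
    (rem : List Int) :
    ∀ (forbidden : PySem.Set Int) (chosen : List Int)
      (st : List (List Int × PySem.Set Int × List Int)) (families : List (List Int)),
      esuf_loop cmp rank_family ((rem, forbidden, chosen) :: st) families =
        esuf_loop cmp rank_family st
          (families ++ (esuf_go cmp rem forbidden chosen).map (familyOf rank_family)) := by
  induction rem with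
  | nil =>
      intro forbidden chosen st families
      simp [esuf_loop, esuf_go]
  | cons current rest ih =>
      intro forbidden chosen st families
      cases hc : PySem.Set.contains forbidden current with
      | true =>
          have hm : current ∈ forbidden := by simp [pysem] at hc; exact hc
          rw [esuf_loop, hc]
          simp only [Bool.not_true, Bool.false_eq_true, if_false]
          rw [ih]
          simp [esuf_go, hm]
      | false =>
          have hm : current ∉ forbidden := by simp [pysem] at hc; exact hc
          rw [esuf_loop, hc]
          simp only [Bool.not_false, if_true]
          rw [ih, ih]
          simp [esuf_go, hm, List.map_append, List.append_assoc]

-- ===== VERDICT (by name: the statement is the Claim_ definition above) =====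
theorem enumerate_shifted_uniform_families_spec : Claim_equal_enumerate_shifted_uniform_families := by
  intro n rank subsets _hdom
  unfold Spec_enumerate_shifted_uniform_families
  unfold enumerate_shifted_uniform_families enumerate_shifted_uniform_families_alt
  rw [esuf_loop_frame, PySem.List.foldl_append_singleton_eq_map]
  simp [esuf_loop]
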